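-- pv_equiv track=rewrite | github.com/bluemiv/Algorithm | mailprogramming/python/exam04.py | solution
-- ===== SOURCE A (Python) =====
-- def solution(arr):
--     result = 0
--
--     for i in range(len(arr[0])):
--         for j in range(1, len(arr)):
--             if len(arr[j]) < i + 1 or arr[j-1][i] != arr[j][i]:
--                 return result  # 인덱스를 벗어나는 경우 또는 전의 값과 지금 값이 다른경우(결과 반환)
--         result += 1
--
--     return result
-- ===== SOURCE B (Python) =====
-- def solution(arr):
--     prefix = arr[0]
--     for s in arr[1:]:
--         i = 0
--         for x, y in zip(prefix, s):
--             if x != y: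
--                 break
--             i += 1
--         prefix = prefix[:i]
--     return len(prefix)
-- ===== Notes on version B (the rewrite author's own statement) =====
-- stated objective: simpler
-- what changed: Replaced the column-by-column nested index loops (with early return and adjacent-row comparison) by a row-by-row scan that shrinks a running common prefix, returning its final length.
import Mathlib
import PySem

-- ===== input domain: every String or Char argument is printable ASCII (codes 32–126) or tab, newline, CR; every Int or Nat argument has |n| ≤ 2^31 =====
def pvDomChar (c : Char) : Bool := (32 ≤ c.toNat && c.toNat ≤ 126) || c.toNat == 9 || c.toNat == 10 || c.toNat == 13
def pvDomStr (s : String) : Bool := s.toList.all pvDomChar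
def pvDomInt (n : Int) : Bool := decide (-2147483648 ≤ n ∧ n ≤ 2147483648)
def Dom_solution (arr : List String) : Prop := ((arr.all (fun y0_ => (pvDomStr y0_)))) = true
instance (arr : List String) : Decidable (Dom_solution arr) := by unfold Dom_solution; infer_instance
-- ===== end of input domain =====

-- B changes the algorithm: instead of A's column-by-column nested loops, B shrinks a
-- running common prefix row by row and returns its length (simpler, one pass over rows).

-- ===== PORT A =====
-- column test: 'for j in range(1, len(arr)): if len(arr[j]) < i+1 or arr[j-1][i] != arr[j][i]: return result'
-- (List.all short-circuits exactly like the early return)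
def solCol (arr : List String) (i : Nat) : Bool :=
  (PySem.List.pyRange 1 arr.length 1).all (fun j =>
    let sj := (PySem.List.pyGet? arr j).getD ""
    let sp := (PySem.List.pyGet? arr (j - 1)).getD ""
    (decide ((i : Int) + 1 ≤ PySem.Str.len sj)) &&
      (PySem.Str.pyGet? sp (i : Int) == PySem.Str.pyGet? sj (i : Int)))

-- 'for i in range(len(arr[0])): … result += 1' as fuel recursion over the remaining columns
def solGo (arr : List String) (fuel : Nat) (i : Nat) (result : Int) : Int :=
  match fuel with
  | 0 => result
  | Nat.succ f => if solCol arr i then solGo arr f (i + 1) (result + 1) else result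

def solution (arr : List String) : Int :=
  match arr with
  | [] => 0  -- Python raises IndexError on arr[0]; excluded by Pre_solution
  | a0 :: _ => solGo arr a0.toList.length 0 0

-- ===== PORT B =====
-- the inner 'for x, y in zip(prefix, s): if x != y: break' + 'prefix = prefix[:i]'
def commonPrefix : List Char → List Char → List Char
  | a :: as, b :: bs => if a == b then a :: commonPrefix as bs else []
  | _, _ => []

def solution_alt (arr : List String) : Int :=
  match arr with
  | [] => 0  -- Python raises IndexError on arr[0]; excluded by Pre_solution
  | a0 :: rest =>
    ((rest.foldl (fun p s => commonPrefix p s.toList) a0.toList).length : Int)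

-- ===== PRECONDITION & SPEC =====
-- A raises IndexError on the empty list (arr[0]); B raises there too.
def Pre_solution (arr : List String) : Prop := arr ≠ []
instance (arr : List String) : Decidable (Pre_solution arr) := by unfold Pre_solution; infer_instance
def pvWitness_solution : List String := ["abc", "abd"]

def Spec_solution (arr : List String) (out : Int) : Prop := out = solution_alt arr
instance (arr : List String) (out : Int) : Decidable (Spec_solution arr out) := by unfold Spec_solution; infer_instance

-- ===== CLAIM (what is proved, stated in full; the proofs are below) =====
def Claim_equal_solution : Prop := ∀ (arr : List String), Dom_solution arr → Pre_solution arr → Spec_solution arr (solution arr)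

-- ===== LEMMAS AND PROOFS =====

theorem commonPrefix_prefix (a s : List Char) : (commonPrefix a s) <+: a := by
  induction a generalizing s with
  | nil => cases s <;> simp [commonPrefix]
  | cons x as ih =>
    cases s with
    | nil => simp [commonPrefix]
    | cons y ss =>
      by_cases h : x = y
      · obtain ⟨t, ht⟩ := ih ss
        exact ⟨t, by simp [commonPrefix, h, ht]⟩
      · simp [commonPrefix, h]

theorem commonPrefix_le_iff (a s : List Char) (k : Nat) :
    k ≤ (commonPrefix a s).length ↔
      k ≤ a.length ∧ k ≤ s.length ∧ ∀ i < k, a[i]? = s[i]? := by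
  induction a generalizing s k with
  | nil =>
    have hcp : commonPrefix [] s = [] := by cases s <;> rfl
    rw [hcp]
    exact ⟨fun h => ⟨h, by simp at h; omega, fun i hi => absurd hi (by simp at h; omega)⟩,
      fun h => h.1⟩
  | cons x as ih =>
    cases s with
    | nil =>
      simp only [commonPrefix, List.length_nil, List.length_cons, Nat.le_zero]
      exact ⟨fun h => ⟨by omega, by omega, fun i hi => absurd hi (by omega)⟩,
        fun h => by omega⟩
    | cons y ss =>
      by_cases h : x = y
      · subst h
        cases k with
        | zero => simp
        | succ k =>
          simp only [commonPrefix, beq_self_eq_true, if_true, List.length_cons,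
            Nat.succ_le_succ_iff, ih]
          constructor
          · rintro ⟨h1, h2, h3⟩
            refine ⟨h1, h2, ?_⟩
            intro i hi
            cases i with
            | zero => simp
            | succ i => simpa using h3 i (by omega)
          · rintro ⟨h1, h2, h3⟩
            exact ⟨h1, h2, fun i hi => by simpa using h3 (i + 1) (by omega)⟩
      · cases k with
        | zero => simp [commonPrefix, h]
        | succ k =>
          simp only [commonPrefix, beq_iff_eq, h, if_false, List.length_nil]
          constructor
          · omega
          · rintro ⟨-, -, h3⟩
            have := h3 0 (by omega)
            simp at this
            exact absurd this h

-- prefixes agree on getElem? below their length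
theorem prefix_getElem? {p a : List Char} (hp : p <+: a) {i : Nat} (hi : i < p.length) :
    p[i]? = a[i]? := by
  obtain ⟨t, rfl⟩ := hp
  rw [List.getElem?_append_left hi]

theorem foldl_commonPrefix_le_iff (l : List String) (a : List Char) (k : Nat) :
    k ≤ (l.foldl (fun p s => commonPrefix p s.toList) a).length ↔
      k ≤ a.length ∧ ∀ s ∈ l, k ≤ s.toList.length ∧ ∀ i < k, a[i]? = s.toList[i]? := by
  induction l generalizing a with
  | nil => simp
  | cons s l ih =>
    simp only [List.foldl_cons, ih, List.mem_cons, forall_eq_or_imp]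
    constructor
    · rintro ⟨h1, h2⟩
      have hcp := (commonPrefix_le_iff a s.toList k).1 h1
      refine ⟨hcp.1, ⟨hcp.2.1, hcp.2.2⟩, ?_⟩
      intro t ht
      obtain ⟨ht1, ht2⟩ := h2 t ht
      refine ⟨ht1, fun i hi => ?_⟩
      rw [← prefix_getElem? (commonPrefix_prefix a s.toList) (by omega), ht2 i hi]
    · rintro ⟨h1, ⟨hs1, hs2⟩, h2⟩
      have hcp : k ≤ (commonPrefix a s.toList).length :=
        (commonPrefix_le_iff a s.toList k).2 ⟨h1, hs1, hs2⟩
      refine ⟨hcp, ?_⟩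
      intro t ht
      obtain ⟨ht1, ht2⟩ := h2 t ht
      refine ⟨ht1, fun i hi => ?_⟩
      rw [prefix_getElem? (commonPrefix_prefix a s.toList) (by omega)]
      exact ht2 i hi

-- solCol unfolded to a statement about consecutive natural indices
theorem solCol_iff (arr : List String) (i : Nat) :
    solCol arr i = true ↔
      ∀ m : Nat, m + 1 < arr.length →
        i < arr[m + 1]!.toList.length ∧ arr[m]!.toList[i]? = arr[m + 1]!.toList[i]? := by
  unfold solCol
  rw [List.all_eq_true]
  constructor
  · intro h m hm
    have hmem : ((m : Int) + 1) ∈ PySem.List.pyRange 1 arr.length 1 := by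
      rw [PySem.List.mem_pyRange_one]
      constructor <;> [omega; exact_mod_cast (by exact_mod_cast hm : (m : Int) + 1 < (arr.length : Int))]
    have := h _ hmem
    simp only [Bool.and_eq_true, decide_eq_true_eq, beq_iff_eq] at this
    have hg1 : PySem.List.pyGet? arr ((m : Int) + 1) = some arr[m + 1]! := by
      have : ((m : Int) + 1) = ((m + 1 : Nat) : Int) := by omega
      rw [this, PySem.List.pyGet?_natCast, List.getElem?_eq_getElem hm, List.getElem!_eq_getElem?_getD,
        List.getElem?_eq_getElem hm]
      rfl
    have hg0 : PySem.List.pyGet? arr ((m : Int) + 1 - 1) = some arr[m]! := by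
      have : ((m : Int) + 1 - 1) = ((m : Nat) : Int) := by omega
      rw [this, PySem.List.pyGet?_natCast, List.getElem?_eq_getElem (by omega), List.getElem!_eq_getElem?_getD,
        List.getElem?_eq_getElem (by omega)]
      rfl
    rw [hg1, hg0] at this
    simp only [Option.getD_some] at this
    obtain ⟨h1, h2⟩ := this
    simp only [PySem.Str.len_eq] at h1
    refine ⟨by exact_mod_cast (by omega : (i : Int) < (arr[m+1]!.toList.length : Int)), ?_⟩
    simpa using h2
  · intro h j hj
    rw [PySem.List.mem_pyRange_one] at hj
    obtain ⟨hj1, hj2⟩ := hj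
    obtain ⟨m, rfl⟩ : ∃ m : Nat, j = (m : Int) + 1 := ⟨(j - 1).toNat, by omega⟩
    have hm : m + 1 < arr.length := by exact_mod_cast (by omega : (m : Int) + 1 < (arr.length : Int))
    obtain ⟨h1, h2⟩ := h m hm
    have hg1 : PySem.List.pyGet? arr ((m : Int) + 1) = some arr[m + 1]! := by
      have : ((m : Int) + 1) = ((m + 1 : Nat) : Int) := by omega
      rw [this, PySem.List.pyGet?_natCast, List.getElem?_eq_getElem hm, List.getElem!_eq_getElem?_getD,
        List.getElem?_eq_getElem hm]
      rfl
    have hg0 : PySem.List.pyGet? arr ((m : Int) + 1 - 1) = some arr[m]! := by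
      have : ((m : Int) + 1 - 1) = ((m : Nat) : Int) := by omega
      rw [this, PySem.List.pyGet?_natCast, List.getElem?_eq_getElem (by omega), List.getElem!_eq_getElem?_getD,
        List.getElem?_eq_getElem (by omega)]
      rfl
    simp only [hg1, hg0, Option.getD_some, Bool.and_eq_true, decide_eq_true_eq, beq_iff_eq]
    refine ⟨?_, ?_⟩
    · simp only [PySem.Str.len_eq]
      exact_mod_cast (by omega : (i : Int) + 1 ≤ (arr[m+1]!.toList.length : Int))
    · simpa using h2

-- all columns < k pass  ↔  every later row shares a0's first k characters
theorem cols_iff_head (a0 : String) (rest : List String) (k : Nat) (hk : k ≤ a0.toList.length) :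
    (∀ i < k, solCol (a0 :: rest) i = true) ↔
      ∀ s ∈ rest, k ≤ s.toList.length ∧ ∀ i < k, a0.toList[i]? = s.toList[i]? := by
  induction rest generalizing a0 k with
  | nil =>
    simp only [List.mem_nil_iff, false_implies, implies_true, iff_true]
    intro i _
    rw [solCol_iff]
    intro m hm
    simp at hm
  | cons s rest ih =>
    constructor
    · intro h
      have hadj : ∀ i < k, i < s.toList.length ∧ a0.toList[i]? = s.toList[i]? := by
        intro i hi
        have := (solCol_iff _ i).1 (h i hi) 0 (by simp)
        simpa using this
      have hslen : k ≤ s.toList.length := by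
        rcases Nat.eq_zero_or_pos k with h0 | h0
        · omega
        · have := (hadj (k - 1) (by omega)).1; omega
      have htail : ∀ i < k, solCol (s :: rest) i = true := by
        intro i hi
        rw [solCol_iff]
        intro m hm
        have := (solCol_iff _ i).1 (h i hi) (m + 1) (by simpa using hm)
        simpa using this
      intro t ht
      rcases List.mem_cons.1 ht with rfl | ht'
      · exact ⟨hslen, fun i hi => (hadj i hi).2⟩
      · obtain ⟨ht1, ht2⟩ := ((ih s k hslen).1 htail) t ht'
        exact ⟨ht1, fun i hi => by rw [(hadj i hi).2, ht2 i hi]⟩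
    · intro h i hi
      obtain ⟨hs1, hs2⟩ := h s (by simp)
      have htail : ∀ t ∈ rest, k ≤ t.toList.length ∧ ∀ i < k, s.toList[i]? = t.toList[i]? := by
        intro t ht
        obtain ⟨ht1, ht2⟩ := h t (List.mem_cons_of_mem s ht)
        exact ⟨ht1, fun i hi => by rw [← hs2 i hi, ht2 i hi]⟩
      have hrec := ((ih s k hs1).2 htail) i hi
      rw [solCol_iff]
      intro m hm
      cases m with
      | zero =>
        simp only [List.length_cons] at hm
        constructor
        · simpa using (by omega : i < s.toList.length)
        · simpa using hs2 i hi
      | succ m =>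
        have := (solCol_iff (s :: rest) i).1 hrec m (by simpa using hm)
        simpa using this

theorem go_eq (arr : List String) (a0 : String) (rest : List String)
    (harr : arr = a0 :: rest) (L : Nat)
    (hL : L = (rest.foldl (fun p s => commonPrefix p s.toList) a0.toList).length) :
    ∀ fuel i : Nat, i + fuel = a0.toList.length → (∀ i' < i, solCol arr i' = true) →
      solGo arr fuel i (i : Int) = (L : Int) := by
  have hLle : L ≤ a0.toList.length :=
    ((foldl_commonPrefix_le_iff rest a0.toList L).1 (le_of_eq hL)).1
  have hiff : ∀ k ≤ a0.toList.length, ((∀ i' < k, solCol arr i' = true) ↔ k ≤ L) := by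
    intro k hk
    rw [harr, cols_iff_head a0 rest k hk, hL, foldl_commonPrefix_le_iff]
    constructor
    · exact fun h => ⟨hk, h⟩
    · exact fun h => h.2
  intro fuel
  induction fuel with
  | zero =>
    intro i hi hcols
    have hn : i = a0.toList.length := by omega
    have : i ≤ L := (hiff i (by omega)).1 hcols
    have : i = L := by omega
    simp [solGo, this]
  | succ f ihf =>
    intro i hi hcols
    unfold solGo
    by_cases hc : solCol arr i = true
    · rw [if_pos hc]
      have := ihf (i + 1) (by omega)
        (fun i' hi' => by rcases Nat.lt_succ_iff_lt_or_eq.1 hi' with h | h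
                          · exact hcols i' h
                          · exact h ▸ hc)
      push_cast at this ⊢
      convert this using 2
    · rw [if_neg hc]
      have hle : i ≤ L := (hiff i (by omega)).1 hcols
      have hge : L ≤ i := by
        by_contra hlt
        have : i + 1 ≤ L := by omega
        have := (hiff (i + 1) (by omega)).2 this
        exact hc (this i (by omega))
      have : i = L := by omega
      simp [this]

-- ===== VERDICT (by name: the statement is the Claim_ definition above) =====
theorem solution_spec : Claim_equal_solution := by
  intro arr _ hpre
  cases arr with
  | nil => exact absurd rfl hpre
  | cons a0 rest =>
    unfold Spec_solution solution solution_alt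
    have := go_eq (a0 :: rest) a0 rest rfl _ rfl a0.toList.length 0 (by omega)
      (fun i' hi' => absurd hi' (by omega))
    simpa using this
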